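-- pv_equiv track=rewrite | github.com/Shubham-Paliwal20/checkkaro | backend/routes/product_final.py | classify_ingredient_strict
-- ===== SOURCE A (Python) =====
-- BANNED_INGREDIENTS = [
--     # EU banned in cosmetics
--     'triclosan', 'formaldehyde', 'hydroquinone', 'mercury', 'lead',
--     # EU banned food additives
--     'e128', 'e216', 'e217', 'e240', 'sudan red', 'para red',
--     # Parabens (restricted/banned in many countries)
--     'methylparaben', 'propylparaben', 'butylparaben', 'ethylparaben',
--     # Other internationally banned/restricted
--     'bha', 'bht', 'sodium nitrite', 'sodium nitrate', 'potassium bromate',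
--     'azodicarbonamide', 'brominated vegetable oil', 'olestra',
--     # Carcinogens
--     'asbestos', 'benzene', 'vinyl chloride', 'aflatoxin'
-- ]
--
-- COMMONLY_QUESTIONED = [
--     'sodium lauryl sulfate', 'sls', 'sodium laureth sulfate', 'sles',
--     'phthalate', 'diethyl phthalate', 'dibutyl phthalate',
--     'artificial color', 'artificial colour', 'tartrazine', 'sunset yellow',
--     'carmoisine', 'allura red', 'brilliant blue', 'e102', 'e110', 'e122', 'e124', 'e133',
--     'monosodium glutamate', 'msg', 'disodium guanylate', 'disodium inosinate',
--     'sodium benzoate', 'potassium sorbate', 'tetrasodium edta',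
--     'propylene glycol', 'polyethylene glycol', 'peg-', 'fragrance', 'parfum',
--     'titanium dioxide', 'aluminum', 'aluminium'
-- ]
--
-- WORTH_KNOWING = [
--     'palm oil', 'palmolein', 'vegetable oil', 'edible vegetable oil',
--     'sugar', 'glucose syrup', 'high fructose corn syrup', 'corn syrup',
--     'artificial flavor', 'artificial flavour', 'natural flavor', 'natural flavour',
--     'citric acid', 'ascorbic acid', 'sodium chloride', 'salt',
--     'emulsifier', 'stabilizer', 'thickener', 'preservative',
--     'caramel color', 'caramel colour', 'lecithin', 'soy lecithin'
-- ]
--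
-- def classify_ingredient_strict(ingredient_name: str) -> str:
--     """Strict ingredient classification based on international bans and restrictions"""
--     name_lower = ingredient_name.lower()
--
--     # Check for banned ingredients first (highest priority)
--     for banned in BANNED_INGREDIENTS:
--         if banned in name_lower:
--             return "banned"
--
--     # Check for commonly questioned
--     for questioned in COMMONLY_QUESTIONED:
--         if questioned in name_lower:
--             return "commonly_questioned"
--
--     # Check for worth knowing
--     for worth in WORTH_KNOWING:
--         if worth in name_lower:
--             return "worth_knowing"
--
--     # Default to generally recognised
--     return "generally_recognised"
-- ===== SOURCE B (Python) =====
-- BANNED_INGREDIENTS = [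
--     'triclosan', 'formaldehyde', 'hydroquinone', 'mercury', 'lead',
--     'e128', 'e216', 'e217', 'e240', 'sudan red', 'para red',
--     'methylparaben', 'propylparaben', 'butylparaben', 'ethylparaben',
--     'bha', 'bht', 'sodium nitrite', 'sodium nitrate', 'potassium bromate',
--     'azodicarbonamide', 'brominated vegetable oil', 'olestra',
--     'asbestos', 'benzene', 'vinyl chloride', 'aflatoxin'
-- ]
--
-- COMMONLY_QUESTIONED = [
--     'sodium lauryl sulfate', 'sls', 'sodium laureth sulfate', 'sles',
--     'phthalate', 'diethyl phthalate', 'dibutyl phthalate',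
--     'artificial color', 'artificial colour', 'tartrazine', 'sunset yellow',
--     'carmoisine', 'allura red', 'brilliant blue', 'e102', 'e110', 'e122', 'e124', 'e133',
--     'monosodium glutamate', 'msg', 'disodium guanylate', 'disodium inosinate',
--     'sodium benzoate', 'potassium sorbate', 'tetrasodium edta',
--     'propylene glycol', 'polyethylene glycol', 'peg-', 'fragrance', 'parfum',
--     'titanium dioxide', 'aluminum', 'aluminium'
-- ]
--
-- WORTH_KNOWING = [
--     'palm oil', 'palmolein', 'vegetable oil', 'edible vegetable oil',
--     'sugar', 'glucose syrup', 'high fructose corn syrup', 'corn syrup',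
--     'artificial flavor', 'artificial flavour', 'natural flavor', 'natural flavour',
--     'citric acid', 'ascorbic acid', 'sodium chloride', 'salt',
--     'emulsifier', 'stabilizer', 'thickener', 'preservative',
--     'caramel color', 'caramel colour', 'lecithin', 'soy lecithin'
-- ]
--
-- # One merged priority table: (pattern, rank); rank 0 = banned, 1 = questioned, 2 = worth knowing.
-- _RULES = (
--     [(p, 0) for p in BANNED_INGREDIENTS]
--     + [(p, 1) for p in COMMONLY_QUESTIONED]
--     + [(p, 2) for p in WORTH_KNOWING]
-- )
-- _LABELS = ["banned", "commonly_questioned", "worth_knowing", "generally_recognised"]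
--
--
-- def classify_ingredient_strict(ingredient_name: str) -> str:
--     """Single fold over a merged ranked table: keep the minimum rank of any
--     matching pattern, then index into the label array."""
--     name_lower = ingredient_name.lower()
--     best = 3
--     for pat, rank in _RULES:
--         if pat in name_lower:
--             best = min(best, rank)
--     return _LABELS[best]
-- ===== Notes on version B (the rewrite author's own statement) =====
-- stated objective: alternative
-- what changed: Replaces A's three sequenced early-return substring loops with one fold over a single merged (pattern, rank) priority table that maintains the minimum matching rank, returning the label by indexing a label array.
import Mathlib
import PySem

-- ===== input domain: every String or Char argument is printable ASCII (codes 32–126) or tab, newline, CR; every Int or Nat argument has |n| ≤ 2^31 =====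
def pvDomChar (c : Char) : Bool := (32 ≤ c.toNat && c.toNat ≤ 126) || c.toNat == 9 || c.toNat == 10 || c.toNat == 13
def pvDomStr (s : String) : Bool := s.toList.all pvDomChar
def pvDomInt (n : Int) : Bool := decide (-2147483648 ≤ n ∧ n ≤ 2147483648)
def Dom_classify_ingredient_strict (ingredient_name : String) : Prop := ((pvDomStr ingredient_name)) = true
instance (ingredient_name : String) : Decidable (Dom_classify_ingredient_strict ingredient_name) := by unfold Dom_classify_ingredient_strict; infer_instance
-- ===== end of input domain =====

-- B replaces A's three sequenced early-return substring loops by one fold over a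
-- merged (pattern, rank) priority table keeping the minimum matching rank
-- (objective: alternative; same cost).

-- ===== PORT A =====
def pvBanned : List String := [
  "triclosan", "formaldehyde", "hydroquinone", "mercury", "lead",
  "e128", "e216", "e217", "e240", "sudan red", "para red",
  "methylparaben", "propylparaben", "butylparaben", "ethylparaben",
  "bha", "bht", "sodium nitrite", "sodium nitrate", "potassium bromate",
  "azodicarbonamide", "brominated vegetable oil", "olestra",
  "asbestos", "benzene", "vinyl chloride", "aflatoxin"]

def pvQuestioned : List String := [
  "sodium lauryl sulfate", "sls", "sodium laureth sulfate", "sles",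
  "phthalate", "diethyl phthalate", "dibutyl phthalate",
  "artificial color", "artificial colour", "tartrazine", "sunset yellow",
  "carmoisine", "allura red", "brilliant blue", "e102", "e110", "e122", "e124", "e133",
  "monosodium glutamate", "msg", "disodium guanylate", "disodium inosinate",
  "sodium benzoate", "potassium sorbate", "tetrasodium edta",
  "propylene glycol", "polyethylene glycol", "peg-", "fragrance", "parfum",
  "titanium dioxide", "aluminum", "aluminium"]

def pvWorth : List String := [
  "palm oil", "palmolein", "vegetable oil", "edible vegetable oil",
  "sugar", "glucose syrup", "high fructose corn syrup", "corn syrup",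
  "artificial flavor", "artificial flavour", "natural flavor", "natural flavour",
  "citric acid", "ascorbic acid", "sodium chloride", "salt",
  "emulsifier", "stabilizer", "thickener", "preservative",
  "caramel color", "caramel colour", "lecithin", "soy lecithin"]

-- 'for p in pats: if p in name_lower: return label' — early-return loop
def pvScanA (pats : List String) (s : List Char) (label : String) : Option String :=
  match pats with
  | [] => none
  | p :: rest => if PySem.Chars.isIn p.toList s then some label else pvScanA rest s label

def classify_ingredient_strict (ingredient_name : String) : String :=
  let name_lower := (PySem.Str.lower ingredient_name).toList
  match pvScanA pvBanned name_lower "banned" with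
  | some r => r
  | none =>
    match pvScanA pvQuestioned name_lower "commonly_questioned" with
    | some r => r
    | none =>
      match pvScanA pvWorth name_lower "worth_knowing" with
      | some r => r
      | none => "generally_recognised"

-- ===== PORT B =====
def pvRules : List (String × Nat) :=
  pvBanned.map (fun p => (p, 0)) ++ pvQuestioned.map (fun p => (p, 1))
    ++ pvWorth.map (fun p => (p, 2))

def pvLabels : List String :=
  ["banned", "commonly_questioned", "worth_knowing", "generally_recognised"]

def classify_ingredient_strict_alt (ingredient_name : String) : String :=
  let name_lower := (PySem.Str.lower ingredient_name).toList
  let best : Nat := pvRules.foldl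
    (fun b pr => if PySem.Chars.isIn pr.1.toList name_lower then min b pr.2 else b) 3
  -- _LABELS[best]: best ≤ 3 always, so Python's indexing is exact here
  PySem.List.pyGetD pvLabels (best : Int) "generally_recognised"

-- ===== PRECONDITION & SPEC =====
def Spec_classify_ingredient_strict (ingredient_name : String) (out : String) : Prop := out = classify_ingredient_strict_alt ingredient_name
instance (ingredient_name : String) (out : String) : Decidable (Spec_classify_ingredient_strict ingredient_name out) := by unfold Spec_classify_ingredient_strict; infer_instance

-- ===== CLAIM (what is proved, stated in full; the proofs are below) =====
def Claim_equal_classify_ingredient_strict : Prop := ∀ (ingredient_name : String), Dom_classify_ingredient_strict ingredient_name → Spec_classify_ingredient_strict ingredient_name (classify_ingredient_strict ingredient_name)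

-- ===== LEMMAS AND PROOFS =====

-- A's early-return loop returns the label iff some pattern matches
theorem pvScanA_eq (pats : List String) (s : List Char) (label : String) :
    pvScanA pats s label
      = if pats.any (fun p => PySem.Chars.isIn p.toList s) then some label else none := by
  induction pats with
  | nil => simp [pvScanA]
  | cons p rest ih => by_cases h : PySem.Chars.isIn p.toList s <;> simp [pvScanA, h, ih]

-- B's fold over a constant-rank block folds to a single min
theorem pvFold_min (pats : List String) (r : Nat) (s : List Char) (b : Nat) :
    (pats.map (fun p => (p, r))).foldl
        (fun b pr => if PySem.Chars.isIn pr.1.toList s then min b pr.2 else b) b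
      = if pats.any (fun p => PySem.Chars.isIn p.toList s) then min b r else b := by
  induction pats generalizing b with
  | nil => simp
  | cons p rest ih =>
    by_cases h : PySem.Chars.isIn p.toList s <;>
      simp [h, ih]

-- ===== VERDICT (by name: the statement is the Claim_ definition above) =====
theorem classify_ingredient_strict_spec : Claim_equal_classify_ingredient_strict := by
  intro ingredient_name _
  unfold Spec_classify_ingredient_strict
  unfold classify_ingredient_strict classify_ingredient_strict_alt pvRules
  simp only [List.foldl_append, pvFold_min, pvScanA_eq]
  by_cases h0 : pvBanned.any (fun p => PySem.Chars.isIn p.toList (PySem.Str.lower ingredient_name).toList) <;>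
  by_cases h1 : pvQuestioned.any (fun p => PySem.Chars.isIn p.toList (PySem.Str.lower ingredient_name).toList) <;>
  by_cases h2 : pvWorth.any (fun p => PySem.Chars.isIn p.toList (PySem.Str.lower ingredient_name).toList) <;>
    simp only [h0, h1, h2, if_true] <;> rfl
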